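-- pv_equiv track=rewrite | github.com/MrBrantCode/unitest_baseline | mut_generate/mist_train_cf/cf_80413/solution.py | are_anagrams_and_palindromes
-- ===== SOURCE A (Python) =====
-- def are_anagrams_and_palindromes(str1, str2):
--     def clean_input(input_str):
--         return ''.join(e for e in input_str if e.isalnum()).lower()
--
--     def is_anagram(str1, str2):
--         return sorted(str1) == sorted(str2)
--
--     def is_palindrome(input_str):
--         return input_str == input_str[::-1]
--
--     str1 = clean_input(str1)
--     str2 = clean_input(str2)
--
--     return is_anagram(str1, str2) and is_palindrome(str1) and is_palindrome(str2)
-- ===== SOURCE B (Python) =====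
-- def are_anagrams_and_palindromes(str1, str2):
--     def clean_input(input_str):
--         return ''.join(e for e in input_str if e.isalnum()).lower()
--
--     def char_freq(s):
--         freq = {}
--         for c in s:
--             freq[c] = freq.get(c, 0) + 1
--         return freq
--
--     def is_palindrome(s):
--         i, j = 0, len(s) - 1
--         while i < j:
--             if s[i] != s[j]:
--                 return False
--             i += 1
--             j -= 1
--         return True
--
--     s1 = clean_input(str1)
--     s2 = clean_input(str2)
--     return char_freq(s1) == char_freq(s2) and is_palindrome(s1) and is_palindrome(s2)
-- ===== Notes on version B (the rewrite author's own statement) =====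
-- stated objective: alternative
-- what changed: The anagram test compares character-frequency dictionaries built in one pass instead of comparing sorted copies, and the palindrome test walks two indices inward meeting in the middle instead of building and comparing the reversed string.
import Mathlib
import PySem

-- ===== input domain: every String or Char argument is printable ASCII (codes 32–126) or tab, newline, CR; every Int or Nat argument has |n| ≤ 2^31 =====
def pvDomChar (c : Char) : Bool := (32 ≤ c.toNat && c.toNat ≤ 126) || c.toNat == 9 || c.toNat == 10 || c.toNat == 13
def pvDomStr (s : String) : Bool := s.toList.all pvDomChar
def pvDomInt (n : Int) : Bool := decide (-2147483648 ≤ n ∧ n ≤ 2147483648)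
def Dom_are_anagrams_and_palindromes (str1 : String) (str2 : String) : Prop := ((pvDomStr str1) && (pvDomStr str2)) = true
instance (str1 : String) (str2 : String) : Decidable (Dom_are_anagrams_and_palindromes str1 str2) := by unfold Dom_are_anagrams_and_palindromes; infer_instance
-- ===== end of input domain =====

-- B replaces the sorted-copies anagram test with a one-pass frequency-dictionary comparison and
-- the slice-reversal palindrome test with a two-pointer inward walk (alternative decomposition).


-- ===== PORT A =====
-- ''.join(e for e in input_str if e.isalnum()).lower()
def pvCleanA (cs : List Char) : List Char :=
  PySem.Chars.lower (cs.filter (fun e => PySem.Chars.isalnum e))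

-- sorted(str1) == sorted(str2)
def pvIsAnagramA (s1 s2 : List Char) : Bool :=
  PySem.List.sorted s1 (fun x => x) false == PySem.List.sorted s2 (fun x => x) false

-- input_str == input_str[::-1]; s[::-1] is List.reverse (PySem.List.slice?_none_none_neg_one)
def pvIsPalindromeA (s : List Char) : Bool := s == s.reverse

def are_anagrams_and_palindromes (str1 : String) (str2 : String) : Bool :=
  pvIsAnagramA (pvCleanA str1.toList) (pvCleanA str2.toList)
    && pvIsPalindromeA (pvCleanA str1.toList) && pvIsPalindromeA (pvCleanA str2.toList)

-- ===== PORT B =====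
def pvCleanB (cs : List Char) : List Char :=
  PySem.Chars.lower (cs.filter (fun e => PySem.Chars.isalnum e))

-- for c in s: freq[c] = freq.get(c, 0) + 1
def pvFreq (s : List Char) : PySem.Dict Char Int :=
  s.foldl (fun d c => d.insert c (d.getD c 0 + 1)) PySem.Dict.empty

-- Python dict ==: same key set, equal value at each key (insertion order ignored)
def pvDictEq (d1 d2 : PySem.Dict Char Int) : Bool :=
  PySem.Set.equal d1.keys d2.keys && d1.keys.all (fun k => d1.getD k 0 == d2.getD k 0)

-- while i < j: mismatch → False; i += 1; j -= 1
def pvPal2 (s : List Char) (i j : Nat) : Bool :=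
  if i < j then
    if s[i]? == s[j]? then pvPal2 s (i + 1) (j - 1) else false
  else true
termination_by j - i

def pvIsPalindromeB (s : List Char) : Bool := pvPal2 s 0 (s.length - 1)

def are_anagrams_and_palindromes_alt (str1 : String) (str2 : String) : Bool :=
  pvDictEq (pvFreq (pvCleanB str1.toList)) (pvFreq (pvCleanB str2.toList))
    && pvIsPalindromeB (pvCleanB str1.toList) && pvIsPalindromeB (pvCleanB str2.toList)

-- ===== PRECONDITION & SPEC =====
def Spec_are_anagrams_and_palindromes (str1 : String) (str2 : String) (out : Bool) : Prop := out = are_anagrams_and_palindromes_alt str1 str2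
instance (str1 : String) (str2 : String) (out : Bool) : Decidable (Spec_are_anagrams_and_palindromes str1 str2 out) := by unfold Spec_are_anagrams_and_palindromes; infer_instance

-- ===== CLAIM (what is proved, stated in full; the proofs are below) =====
def Claim_equal_are_anagrams_and_palindromes : Prop := ∀ (str1 : String) (str2 : String), Dom_are_anagrams_and_palindromes str1 str2 → Spec_are_anagrams_and_palindromes str1 str2 (are_anagrams_and_palindromes str1 str2)

-- ===== LEMMAS AND PROOFS =====

lemma pvAnagramA_iff (s1 s2 : List Char) : pvIsAnagramA s1 s2 = true ↔ s1.Perm s2 := by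
  simp [pvIsAnagramA, PySem.List.sorted_id_eq_sorted_id_iff_perm]

lemma pvSameFreq_iff (s1 s2 : List Char) :
    pvDictEq (pvFreq s1) (pvFreq s2) = true ↔ s1.Perm s2 := by
  have h1 : pvFreq s1 = PySem.Dict.counter s1 :=
    PySem.Dict.foldl_insert_getD_add_one_eq_counter s1
  have h2 : pvFreq s2 = PySem.Dict.counter s2 :=
    PySem.Dict.foldl_insert_getD_add_one_eq_counter s2
  rw [pvDictEq, h1, h2]
  simp only [PySem.Dict.keys_counter, PySem.Dict.getD_counter, Bool.and_eq_true,
    List.all_eq_true, beq_iff_eq, PySem.Set.equal_iff, PySem.Set.mem_ofList, Nat.cast_inj]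
  rw [List.perm_iff_count]
  constructor
  · rintro ⟨hset, hcnt⟩ c
    by_cases hc : c ∈ s1
    · exact hcnt c hc
    · have hc2 : c ∉ s2 := fun h => hc ((hset c).mpr h)
      rw [List.count_eq_zero_of_not_mem hc, List.count_eq_zero_of_not_mem hc2]
  · intro h
    refine ⟨fun c => ?_, fun c _ => h c⟩
    have hc := h c
    constructor <;> intro hm
    · rw [← List.count_pos_iff] at hm ⊢; omega
    · rw [← List.count_pos_iff] at hm ⊢; omega

lemma pvPal2_base (s : List Char) (i j : Nat) (hij : ¬ i < j) :
    ∀ k, i ≤ k → k ≤ j → s[k]? = s[i + j - k]? := by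
  intro k hk1 hk2
  have hkij : k = i ∧ i = j := by omega
  obtain ⟨rfl, rfl⟩ := hkij
  congr 1; omega

lemma pvPal2_iff_aux (s : List Char) (n : Nat) : ∀ i j, j - i ≤ n →
    (pvPal2 s i j = true ↔ ∀ k, i ≤ k → k ≤ j → s[k]? = s[i + j - k]?) := by
  induction n with
  | zero =>
    intro i j h
    have hij : ¬ i < j := by omega
    rw [pvPal2, if_neg hij]
    exact ⟨fun _ => pvPal2_base s i j hij, fun _ => rfl⟩
  | succ n ih =>
    intro i j h
    by_cases hij : i < j
    · rw [pvPal2, if_pos hij]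
      by_cases hm : s[i]? = s[j]?
      · rw [if_pos (by simpa using hm), ih (i + 1) (j - 1) (by omega)]
        constructor
        · intro hrec k hk1 hk2
          by_cases hki : k = i
          · have hidx : i + j - k = j := by omega
            rw [hidx, hki]; exact hm
          · by_cases hkj : k = j
            · have hidx : i + j - k = i := by omega
              rw [hidx, hkj]; exact hm.symm
            · have h' := hrec k (by omega) (by omega)
              rw [h']; congr 1; omega
        · intro hall k hk1 hk2
          have h' := hall k (by omega) (by omega)
          rw [h']; congr 1; omega
      · rw [if_neg (by simp only [beq_iff_eq]; exact hm)]
        refine ⟨fun hfalse => absurd hfalse (by simp), fun hall => ?_⟩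
        exfalso
        have := hall i le_rfl (by omega)
        rw [show i + j - i = j from by omega] at this
        exact hm this
    · rw [pvPal2, if_neg hij]
      exact ⟨fun _ => pvPal2_base s i j hij, fun _ => rfl⟩

lemma pvIsPalB_iff (s : List Char) : pvIsPalindromeB s = true ↔ s = s.reverse := by
  rw [pvIsPalindromeB, pvPal2_iff_aux s (s.length - 1) 0 (s.length - 1) (by omega)]
  constructor
  · intro h
    apply List.ext_getElem?
    intro k
    by_cases hk : k < s.length
    · rw [List.getElem?_reverse hk]
      have := h k (Nat.zero_le _) (by omega)
      simpa [Nat.zero_add] using this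
    · rw [List.getElem?_eq_none (by omega),
        List.getElem?_eq_none (by simp; omega)]
  · intro h k hk1 hk2
    by_cases hk : k < s.length
    · have hg : s[k]? = s.reverse[k]? := by rw [← h]
      rw [hg, List.getElem?_reverse hk]
      congr 1; omega
    · rw [List.getElem?_eq_none (by omega), List.getElem?_eq_none (by omega)]

lemma pvPalA_eq_palB (s : List Char) : pvIsPalindromeA s = pvIsPalindromeB s := by
  rw [Bool.eq_iff_iff, pvIsPalB_iff]
  simp [pvIsPalindromeA]

lemma pvAnagram_eq (s1 s2 : List Char) :
    pvIsAnagramA s1 s2 = pvDictEq (pvFreq s1) (pvFreq s2) := by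
  rw [Bool.eq_iff_iff, pvAnagramA_iff, pvSameFreq_iff]

-- ===== VERDICT (by name: the statement is the Claim_ definition above) =====
theorem are_anagrams_and_palindromes_spec : Claim_equal_are_anagrams_and_palindromes := by
  intro str1 str2 _
  unfold Spec_are_anagrams_and_palindromes
  unfold are_anagrams_and_palindromes are_anagrams_and_palindromes_alt
  rw [pvAnagram_eq, pvPalA_eq_palB, pvPalA_eq_palB]
  rfl
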